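-- pv_equiv track=rewrite | github.com/Nghia03092004/nghia03092004.github.io | project_euler_unified/problem_462/solution.py | get_3smooth_up_to
-- ===== SOURCE A (Python) =====
-- def get_3smooth_up_to(N):
--     """Generate all 3-smooth numbers <= N, sorted."""
--     result = []
--     b = 0
--     pow3 = 1
--     while pow3 <= N:
--         a = 0
--         val = pow3
--         while val <= N:
--             result.append(val)
--             a += 1
--             val = pow3 * (1 << a)
--         b += 1
--         pow3 *= 3
--     result.sort()
--     return result
-- ===== SOURCE B (Python) =====
-- def _merge(xs, ys):
--     """Merge two ascending lists into one ascending list."""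
--     if not xs:
--         return list(ys)
--     if not ys:
--         return list(xs)
--     if xs[0] <= ys[0]:
--         return [xs[0]] + _merge(xs[1:], ys)
--     return [ys[0]] + _merge(xs, ys[1:])
--
--
-- def get_3smooth_up_to(N):
--     """Generate all 3-smooth numbers <= N, sorted, by merging the
--     ascending rows {pow3 * 2**k <= N} one power of 3 at a time
--     (no final sort needed)."""
--     result = []
--     pow3 = 1
--     while pow3 <= N:
--         row = []
--         val = pow3
--         while val <= N:
--             row.append(val)
--             val *= 2
--         result = _merge(result, row)
--         pow3 *= 3
--     return result
-- ===== Notes on version B (the rewrite author's own statement) =====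
-- stated objective: alternative
-- what changed: Instead of appending all products of powers of two and three in nested loops and sorting at the end, B merges each already-ascending doubling row into the accumulated sorted result with a recursive two-list merge, so no final sort is needed.
import Mathlib
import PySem

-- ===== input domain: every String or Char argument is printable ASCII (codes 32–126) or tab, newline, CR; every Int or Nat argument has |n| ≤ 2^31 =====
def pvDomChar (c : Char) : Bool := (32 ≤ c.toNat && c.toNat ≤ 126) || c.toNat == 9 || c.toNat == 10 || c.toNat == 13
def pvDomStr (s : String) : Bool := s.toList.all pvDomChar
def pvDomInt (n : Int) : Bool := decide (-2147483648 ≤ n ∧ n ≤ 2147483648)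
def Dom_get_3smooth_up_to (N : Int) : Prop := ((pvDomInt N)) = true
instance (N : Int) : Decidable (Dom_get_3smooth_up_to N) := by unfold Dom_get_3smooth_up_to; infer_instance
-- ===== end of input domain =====

-- B replaces A's collect-everything-then-sort with an incremental merge of the
-- already-ascending rows {pow3 * 2^k ≤ N}, so no final sort is needed (objective: alternative).

-- ===== PORT A =====
-- inner while loop of A: state (a, val), appends val while val ≤ N, val = pow3 * (1 << a)
def pyAInner (N pow3 : Int) : Nat → Nat → Int → List Int → List Int
  | 0, _, _, result => result      -- fuel (never exhausted on admitted inputs)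
  | f + 1, a, val, result =>
    if val ≤ N then pyAInner N pow3 f (a + 1) (pow3 * ((1 : Int) <<< (a + 1))) (result ++ [val])
    else result

-- outer while loop of A: state (b, pow3)
def pyAOuter (N : Int) (F : Nat) : Nat → Int → Int → List Int → List Int
  | 0, _, _, result => result      -- fuel
  | f + 1, b, pow3, result =>
    if pow3 ≤ N then pyAOuter N F f (b + 1) (pow3 * 3) (pyAInner N pow3 F 0 pow3 result)
    else result

def get_3smooth_up_to (N : Int) : List Int :=
  PySem.List.sorted (pyAOuter N (N.toNat + 2) (N.toNat + 2) 0 1 []) (fun x => x) false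

-- ===== PORT B =====
-- port of Source B's recursive _merge
def pyMerge : List Int → List Int → List Int
  | [], ys => ys
  | xs, [] => xs
  | x :: xs, y :: ys =>
    if x ≤ y then x :: pyMerge xs (y :: ys) else y :: pyMerge (x :: xs) ys

-- inner while loop of B: builds the row [val, 2*val, 4*val, …] while ≤ N
def pyRowB (N : Int) : Nat → Int → List Int
  | 0, _ => []                     -- fuel
  | f + 1, val => if val ≤ N then val :: pyRowB N f (val * 2) else []

-- outer while loop of B: merge each row into the accumulated result
def pyBOuter (N : Int) (F : Nat) : Nat → Int → List Int → List Int
  | 0, _, result => result         -- fuel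
  | f + 1, pow3, result =>
    if pow3 ≤ N then pyBOuter N F f (pow3 * 3) (pyMerge result (pyRowB N F pow3))
    else result

def get_3smooth_up_to_alt (N : Int) : List Int :=
  pyBOuter N (N.toNat + 2) (N.toNat + 2) 1 []

-- ===== PRECONDITION & SPEC =====
def Spec_get_3smooth_up_to (N : Int) (out : List Int) : Prop := out = get_3smooth_up_to_alt N
instance (N : Int) (out : List Int) : Decidable (Spec_get_3smooth_up_to N out) := by unfold Spec_get_3smooth_up_to; infer_instance

-- ===== CLAIM (what is proved, stated in full; the proofs are below) =====
def Claim_equal_get_3smooth_up_to : Prop := ∀ (N : Int), Dom_get_3smooth_up_to N → Spec_get_3smooth_up_to N (get_3smooth_up_to N)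

-- ===== LEMMAS AND PROOFS =====

-- concatenation of the rows in the order A (and B) visits them: proof-side spec
def rowsCat (N : Int) (F : Nat) : Nat → Int → List Int
  | 0, _ => []
  | f + 1, p => if p ≤ N then pyRowB N F p ++ rowsCat N F f (p * 3) else []

-- A's inner loop appends exactly the row pyRowB of its current value
theorem pyAInner_eq (N pow3 : Int) :
    ∀ (f : Nat) (a : Nat) (val : Int) (acc : List Int), val = pow3 * ((1 : Int) <<< a) →
      pyAInner N pow3 f a val acc = acc ++ pyRowB N f val := by
  intro f
  induction f with
  | zero => intro a val acc h; simp [pyAInner, pyRowB]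
  | succ f ih =>
    intro a val acc h
    simp only [pyAInner, pyRowB]
    by_cases hle : val ≤ N
    · simp only [hle, if_pos]
      rw [ih (a + 1) _ _ rfl]
      have h2 : pow3 * ((1 : Int) <<< (a + 1)) = val * 2 := by
        subst h; simp [Int.shiftLeft_eq]; ring
      rw [h2]; simp
    · simp [hle]

-- A's outer loop appends exactly the concatenation of the rows
theorem pyAOuter_eq (N : Int) (F : Nat) :
    ∀ (f : Nat) (b p : Int) (acc : List Int),
      pyAOuter N F f b p acc = acc ++ rowsCat N F f p := by
  intro f
  induction f with
  | zero => intro b p acc; simp [pyAOuter, rowsCat]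
  | succ f ih =>
    intro b p acc
    simp only [pyAOuter, rowsCat]
    by_cases hle : p ≤ N
    · simp only [hle, if_pos]
      rw [ih, pyAInner_eq N p F 0 p acc (by simp)]
      simp
    · simp [hle]

-- Source B's _merge is Lean's List.merge
theorem pyMerge_eq_merge : ∀ (xs ys : List Int),
    pyMerge xs ys = List.merge xs ys (fun a b => a ≤ b) := by
  intro xs
  induction xs with
  | nil => intro ys; cases ys <;> simp [pyMerge]
  | cons x xs ihx =>
    intro ys
    induction ys with
    | nil => simp [pyMerge]
    | cons y ys ihy =>
      simp only [pyMerge, List.merge]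
      by_cases h : x ≤ y
      · simp [h, ihx]
      · simp [h, ihy]

-- B's outer loop is a permutation of the concatenation of the rows
theorem pyBOuter_perm (N : Int) (F : Nat) :
    ∀ (f : Nat) (p : Int) (acc : List Int),
      (pyBOuter N F f p acc).Perm (acc ++ rowsCat N F f p) := by
  intro f
  induction f with
  | zero => intro p acc; simp [pyBOuter, rowsCat]
  | succ f ih =>
    intro p acc
    simp only [pyBOuter, rowsCat]
    by_cases hle : p ≤ N
    · simp only [hle, if_pos]
      refine (ih (p * 3) _).trans ?_
      have hm : (pyMerge acc (pyRowB N F p)).Perm (acc ++ pyRowB N F p) := by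
        rw [pyMerge_eq_merge]
        exact List.merge_perm_append fun a b => decide (a ≤ b)
      have := hm.append_right (rowsCat N F f (p * 3))
      simpa using this
    · simp [hle]

-- every element of a row is ≥ its starting value (for a positive start)
theorem pyRowB_ge (N : Int) :
    ∀ (f : Nat) (v x : Int), 1 ≤ v → x ∈ pyRowB N f v → v ≤ x := by
  intro f
  induction f with
  | zero => intro v x _ hx; simp [pyRowB] at hx
  | succ f ih =>
    intro v x hv hx
    simp only [pyRowB] at hx
    by_cases hle : v ≤ N
    · simp only [hle, if_pos, List.mem_cons] at hx
      rcases hx with rfl | hx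
      · exact le_refl x
      · have := ih (v * 2) x (by omega) hx; omega
    · simp [hle] at hx

-- rows are ascending (for a positive start)
theorem pyRowB_sorted (N : Int) :
    ∀ (f : Nat) (v : Int), 1 ≤ v → (pyRowB N f v).Pairwise (· ≤ ·) := by
  intro f
  induction f with
  | zero => intro v _; simp [pyRowB]
  | succ f ih =>
    intro v hv
    simp only [pyRowB]
    by_cases hle : v ≤ N
    · simp only [hle, if_pos]
      refine List.pairwise_cons.mpr ⟨?_, ih (v * 2) (by omega)⟩
      intro x hx
      have := pyRowB_ge N f (v * 2) x (by omega) hx; omega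
    · simp [hle]

-- B's result is ascending
theorem pyBOuter_sorted (N : Int) (F : Nat) :
    ∀ (f : Nat) (p : Int) (acc : List Int), 1 ≤ p → acc.Pairwise (· ≤ ·) →
      (pyBOuter N F f p acc).Pairwise (· ≤ ·) := by
  intro f
  induction f with
  | zero => intro p acc _ hacc; simpa [pyBOuter] using hacc
  | succ f ih =>
    intro p acc hp hacc
    simp only [pyBOuter]
    by_cases hle : p ≤ N
    · simp only [hle, if_pos]
      refine ih (p * 3) _ (by omega) ?_
      rw [pyMerge_eq_merge]
      exact List.Pairwise.merge hacc (pyRowB_sorted N F p hp)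
    · simpa [hle] using hacc

-- ===== VERDICT (by name: the statement is the Claim_ definition above) =====
theorem get_3smooth_up_to_spec : Claim_equal_get_3smooth_up_to := by
  intro N _
  unfold Spec_get_3smooth_up_to get_3smooth_up_to get_3smooth_up_to_alt
  rw [pyAOuter_eq]
  exact PySem.List.sorted_id_eq_of_perm_of_pairwise _ _
    (by simpa using pyBOuter_perm N (N.toNat + 2) (N.toNat + 2) 1 [])
    (pyBOuter_sorted N (N.toNat + 2) (N.toNat + 2) 1 [] (by norm_num) (by simp))
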